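-- pv_equiv track=rewrite | github.com/paiml/depyler | examples/hard_list_algorithms.py | running_min
-- ===== SOURCE A (Python) =====
-- def running_min(nums: list[int]) -> list[int]:
--     """Compute running minimum at each position.
--
--     running_min([3,1,4,1,5]) returns [3,1,1,1,1].
--     """
--     if len(nums) == 0:
--         return []
--     result: list[int] = [nums[0]]
--     current_min: int = nums[0]
--     for i in range(1, len(nums)):
--         if nums[i] < current_min:
--             current_min = nums[i]
--         result.append(current_min)
--     return result
-- ===== SOURCE B (Python) =====
-- def running_min(nums: list[int]) -> list[int]:
--     """Compute running minimum at each position (prefix re-scan formulation)."""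
--     return [min(nums[:i + 1]) for i in range(len(nums))]
-- ===== Notes on version B (the rewrite author's own statement) =====
-- stated objective: simpler
-- what changed: Replaces the single-pass loop maintaining a running current_min and appended result with a one-line comprehension that recomputes each prefix minimum independently via min(nums[:i+1]).
import Mathlib
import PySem

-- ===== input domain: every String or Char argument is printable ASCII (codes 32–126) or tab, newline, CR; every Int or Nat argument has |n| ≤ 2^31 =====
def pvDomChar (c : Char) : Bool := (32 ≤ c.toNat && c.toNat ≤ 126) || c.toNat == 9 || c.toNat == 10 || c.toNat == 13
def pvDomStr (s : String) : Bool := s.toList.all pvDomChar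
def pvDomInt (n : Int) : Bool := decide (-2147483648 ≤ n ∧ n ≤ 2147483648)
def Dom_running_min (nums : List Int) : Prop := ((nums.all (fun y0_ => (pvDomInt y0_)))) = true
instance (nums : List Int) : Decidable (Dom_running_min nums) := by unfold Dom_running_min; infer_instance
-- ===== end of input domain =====

-- B replaces A's single-pass running-minimum loop by a comprehension that recomputes
-- each prefix minimum independently (objective: simpler).

-- ===== PORT A =====
-- Literal port of A: guard on empty, seed result with nums[0], loop i over range(1, len)
-- maintaining current_min; indices are always in range, so pyGetD with default 0 is exact.
def running_min (nums : List Int) : List Int :=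
  if nums.length = 0 then []
  else
    let first := PySem.List.pyGetD nums 0 0
    let st := (PySem.List.pyRange 1 (nums.length : Int) 1).foldl
      (fun (st : List Int × Int) i =>
        let x := PySem.List.pyGetD nums i 0
        let cm := if x < st.2 then x else st.2
        (st.1 ++ [cm], cm)) ([first], first)
    st.1

-- ===== PORT B =====
-- Literal port of B: [min(nums[:i+1]) for i in range(len(nums))]; each slice is
-- nonempty, so min never raises and .getD 0 is exact.
def running_min_alt (nums : List Int) : List Int :=
  (PySem.List.pyRange 0 (nums.length : Int) 1).map
    (fun i => (PySem.List.min? (PySem.List.slice nums none (some (i + 1))) (fun x => x)).getD 0)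

-- ===== PRECONDITION & SPEC =====
def Spec_running_min (nums : List Int) (out : List Int) : Prop := out = running_min_alt nums
instance (nums : List Int) (out : List Int) : Decidable (Spec_running_min nums out) := by unfold Spec_running_min; infer_instance

-- ===== CLAIM (what is proved, stated in full; the proofs are below) =====
def Claim_equal_running_min : Prop := ∀ (nums : List Int), Dom_running_min nums → Spec_running_min nums (running_min nums)

-- ===== LEMMAS AND PROOFS =====

-- A's loop body with the running minimum written as `min`.
theorem rm_body_min (st : List Int × Int) (x : Int) :
    ((if x < st.2 then x else st.2) : Int) = min st.2 x := by
  rcases st with ⟨r, cm⟩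
  simp only [min_def]
  split_ifs <;> omega

-- Core invariant of A's fold, generalized over the accumulator.
theorem rm_fold_eq (t : List Int) : ∀ (x : Int) (acc : List Int),
    (t.foldl (fun (st : List Int × Int) v => (st.1 ++ [min st.2 v], min st.2 v)) (acc ++ [x], x)).1
      = acc ++ (List.range (t.length + 1)).map (fun k => (t.take k).foldl min x) := by
  induction t with
  | nil => intro x acc; simp
  | cons v t ih =>
      intro x acc
      simp only [List.foldl_cons]
      rw [ih (min x v) (acc ++ [x])]
      conv_rhs => rw [List.length_cons, List.range_succ_eq_map]
      simp only [List.map_cons, List.map_map, List.take_zero, List.foldl_nil,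
        List.append_assoc, List.singleton_append]
      congr 2

theorem rm_B_cons (x : Int) (t : List Int) :
    running_min_alt (x :: t)
      = (List.range (t.length + 1)).map (fun k => (t.take k).foldl min x) := by
  unfold running_min_alt
  rw [PySem.List.pyRange_one]
  simp only [List.length_cons, zero_add, Int.sub_zero, Int.toNat_natCast, List.map_map]
  apply List.map_congr_left
  intro k _
  have h1 : ((k : Int) + 1) = ((k + 1 : Nat) : Int) := by push_cast; ring
  simp only [Function.comp, h1, PySem.List.slice_to_natCast, List.take_succ_cons,
    PySem.List.min?_id_cons, Option.getD_some]

-- ===== VERDICT (by name: the statement is the Claim_ definition above) =====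
theorem running_min_spec : Claim_equal_running_min := by
  intro nums _
  unfold Spec_running_min
  cases nums with
  | nil => rfl
  | cons x t =>
      unfold running_min
      simp only [List.length_cons, Nat.succ_ne_zero, if_false]
      rw [show ((t.length + 1 : Nat) : Int) = (((x :: t).length : Nat) : Int) by simp]
      simp only [rm_body_min]
      have hfirst : PySem.List.pyGetD (x :: t) 0 0 = x := by
        simp [PySem.List.pyGetD, PySem.List.pyGet?, PySem.List.pyIdx?]
      rw [hfirst]
      have h := PySem.List.foldl_pyRange_pyGetD' (x :: t) (0 : Int)
        (fun (st : List Int × Int) v => (st.1 ++ [min st.2 v], min st.2 v))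
        ([x], x) (a := 1) (by norm_num)
      simp only at h
      rw [h]
      show ((List.drop 1 (x :: t)).foldl
        (fun (st : List Int × Int) v => (st.1 ++ [min st.2 v], min st.2 v)) ([] ++ [x], x)).1
        = running_min_alt (x :: t)
      rw [List.drop_one, List.tail_cons, rm_fold_eq, rm_B_cons]
      simp only [List.nil_append]
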